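-- pv_equiv track=rewrite | github.com/elynrose/dirs | packages/ffmpeg-pipelines/ffmpeg_pipelines/overlay_video.py | _sanitize_drawtext
-- ===== SOURCE A (Python) =====
-- def _sanitize_drawtext(s: str, max_len: int = 100) -> str:
--     """Keep drawtext-safe ASCII-ish text; escape single quotes for ffmpeg."""
--     raw = (s or "").strip()[:max_len]
--     out = []
--     for c in raw:
--         if c == "\\":
--             out.append("\\\\")
--         elif c == "'":
--             out.append("\\'")
--         elif c == ":":
--             out.append("\\:")
--         elif c == "%":
--             out.append("\\%")
--         elif ord(c) >= 32 and ord(c) < 127 and c not in "\n\r\t":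
--             out.append(c)
--         elif c in " .,!?-+":
--             out.append(c)
--     t = "".join(out).strip()
--     return t or "—"
-- ===== SOURCE B (Python) =====
-- import re
--
-- def _sanitize_drawtext(s: str, max_len: int = 100) -> str:
--     """Keep drawtext-safe ASCII-ish text; escape single quotes for ffmpeg."""
--     raw = (s or "").strip()[:max_len]
--     t = re.sub(r'[^\x20-\x7e]', '', raw)
--     t = re.sub(r"([\\:%'])", r"\\\1", t)
--     return t.strip() or "\u2014"
-- ===== Notes on version B (the rewrite author's own statement) =====
-- stated objective: idiomatic
-- what changed: Replaces the per-character if/elif classification loop with two whole-string passes: a regex deletion of all non-printable/non-ASCII characters followed by a regex backslash-escape of the four special characters.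
import Mathlib
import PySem

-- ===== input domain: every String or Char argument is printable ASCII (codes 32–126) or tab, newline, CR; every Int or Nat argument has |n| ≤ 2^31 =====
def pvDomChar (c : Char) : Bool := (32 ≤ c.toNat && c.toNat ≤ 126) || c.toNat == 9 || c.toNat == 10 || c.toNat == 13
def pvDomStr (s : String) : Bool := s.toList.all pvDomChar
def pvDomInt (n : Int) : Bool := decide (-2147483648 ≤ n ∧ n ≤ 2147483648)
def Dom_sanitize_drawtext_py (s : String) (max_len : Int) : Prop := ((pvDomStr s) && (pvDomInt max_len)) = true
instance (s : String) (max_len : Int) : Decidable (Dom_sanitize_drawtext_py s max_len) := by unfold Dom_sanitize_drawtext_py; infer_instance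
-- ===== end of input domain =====

-- B replaces A's per-character if/elif classification loop by two passes (delete non-printables, then
-- backslash-escape the four specials) — objective: more idiomatic decomposition, same cost.

-- ===== PORT A =====
-- one iteration of A's loop body: the List Char appended to `out` for character c
def pvA_piece (c : Char) : List Char :=
  if c = '\\' then ['\\', '\\']
  else if c = '\'' then ['\\', '\'']
  else if c = ':' then ['\\', ':']
  else if c = '%' then ['\\', '%']
  else if 32 ≤ c.toNat ∧ c.toNat < 127 ∧ c ∉ ['\n', '\r', '\t'] then [c]
  else if c ∈ [' ', '.', ',', '!', '?', '-', '+'] then [c]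
  else []

def sanitize_drawtext_py (s : String) (max_len : Int) : String :=
  let raw := PySem.List.slice (PySem.Chars.strip s.toList) none (some max_len)
  let out := raw.foldl (fun acc c => acc ++ pvA_piece c) []
  let t := PySem.Chars.strip out
  if t = [] then "—" else String.ofList t

-- ===== PORT B =====
-- re.sub(r'[^\x20-\x7e]', '', ·) is exactly filtering to code points 32..126
def pvB_keep (c : Char) : Bool := 32 ≤ c.toNat && c.toNat ≤ 126
-- re.sub(r"([\\:%'])", r"\\\1", ·) is exactly prefixing each of the four specials with a backslash
def pvB_esc (c : Char) : List Char := if c ∈ ['\\', ':', '%', '\''] then ['\\', c] else [c]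

def sanitize_drawtext_py_alt (s : String) (max_len : Int) : String :=
  let raw := PySem.List.slice (PySem.Chars.strip s.toList) none (some max_len)
  let t1 := raw.filter pvB_keep
  let t2 := t1.flatMap pvB_esc
  let t := PySem.Chars.strip t2
  if t = [] then "—" else String.ofList t

-- ===== PRECONDITION & SPEC =====
def Spec_sanitize_drawtext_py (s : String) (max_len : Int) (out : String) : Prop := out = sanitize_drawtext_py_alt s max_len
instance (s : String) (max_len : Int) (out : String) : Decidable (Spec_sanitize_drawtext_py s max_len out) := by unfold Spec_sanitize_drawtext_py; infer_instance

-- ===== CLAIM (what is proved, stated in full; the proofs are below) =====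
def Claim_equal_sanitize_drawtext_py : Prop := ∀ (s : String) (max_len : Int), Dom_sanitize_drawtext_py s max_len → Spec_sanitize_drawtext_py s max_len (sanitize_drawtext_py s max_len)

-- ===== LEMMAS AND PROOFS =====

lemma pv_flatMap_filter {α β : Type} (p : α → Bool) (f : α → List β) (l : List α) :
    (l.filter p).flatMap f = l.flatMap (fun x => if p x then f x else []) := by
  induction l with
  | nil => rfl
  | cons a l ih => by_cases h : p a <;> simp [h, ih]

lemma pv_piece_eq (c : Char) : pvA_piece c = if pvB_keep c then pvB_esc c else [] := by
  unfold pvA_piece pvB_keep pvB_esc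
  by_cases h1 : c = '\\'; · subst h1; decide
  by_cases h2 : c = '\''; · subst h2; decide
  by_cases h3 : c = ':';  · subst h3; decide
  by_cases h4 : c = '%';  · subst h4; decide
  have hmem : c ∉ ['\\', ':', '%', '\''] := by
    intro hm
    rcases (by simpa using hm : c = '\\' ∨ c = ':' ∨ c = '%' ∨ c = '\'') with h | h | h | h
    exacts [h1 h, h3 h, h4 h, h2 h]
  rw [if_neg h1, if_neg h2, if_neg h3, if_neg h4]
  by_cases hk : 32 ≤ c.toNat ∧ c.toNat ≤ 126
  · have hA : 32 ≤ c.toNat ∧ c.toNat < 127 ∧ c ∉ ['\n', '\r', '\t'] := by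
      refine ⟨hk.1, by omega, ?_⟩
      intro hm
      have : c.toNat = 10 ∨ c.toNat = 13 ∨ c.toNat = 9 := by
        rcases (by simpa using hm : c = '\n' ∨ c = '\r' ∨ c = '\t') with h | h | h <;>
          subst h <;> decide
      omega
    rw [if_pos hA, if_pos (show (decide (32 ≤ c.toNat) && decide (c.toNat ≤ 126)) = true by
          simp only [Bool.and_eq_true, decide_eq_true_eq]; exact hk),
        if_neg hmem]
  · have hA : ¬(32 ≤ c.toNat ∧ c.toNat < 127 ∧ c ∉ ['\n', '\r', '\t']) := by
      rintro ⟨ha, hb, -⟩; exact hk ⟨ha, by omega⟩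
    have hpun : c ∉ [' ', '.', ',', '!', '?', '-', '+'] := by
      intro hm
      have : 32 ≤ c.toNat ∧ c.toNat ≤ 126 := by
        rcases (by simpa using hm :
            c = ' ' ∨ c = '.' ∨ c = ',' ∨ c = '!' ∨ c = '?' ∨ c = '-' ∨ c = '+') with
          h | h | h | h | h | h | h <;> subst h <;> decide
      exact hk this
    rw [if_neg hA, if_neg hpun, if_neg (show ¬(decide (32 ≤ c.toNat) && decide (c.toNat ≤ 126)) = true by
          simp only [Bool.and_eq_true, decide_eq_true_eq]; exact hk)]

-- ===== VERDICT (by name: the statement is the Claim_ definition above) =====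
theorem sanitize_drawtext_py_spec : Claim_equal_sanitize_drawtext_py := by
  intro s max_len _
  unfold Spec_sanitize_drawtext_py sanitize_drawtext_py sanitize_drawtext_py_alt
  have hbody :
      (PySem.List.slice (PySem.Chars.strip s.toList) none (some max_len)).foldl
          (fun acc c => acc ++ pvA_piece c) [] =
      ((PySem.List.slice (PySem.Chars.strip s.toList) none (some max_len)).filter
          pvB_keep).flatMap pvB_esc := by
    rw [PySem.List.foldl_append_eq_flatMap, pv_flatMap_filter]
    simp only [List.nil_append]
    exact List.flatMap_congr (fun c _ => pv_piece_eq c)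
  simp only [hbody]
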